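-- pv_equiv track=rewrite | github.com/molanp/zhenxun_plugin_twenty_four | twenty_four.py | contains_all_numbers
-- ===== SOURCE A (Python) =====
-- from collections import Counter
-- from typing import Any
--
-- def isint(num_str: Any) -> bool:
--     """
--     检查字符串是否符合int。
--     """
--     try:
--         int(num_str)
--         return True
--     except ValueError:
--         return False
--
-- def contains_all_numbers(expr, numbers):
--     expr_numbers = []
--     i = 0
--     while i < len(expr):
--         if isint(expr[i]):
--             num = expr[i]
--             while i + 1 < len(expr) and isint(expr[i + 1]):
--                 num += expr[i + 1]
--                 i += 1
--             expr_numbers.append(int(num))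
--         i += 1
--     return Counter(expr_numbers) == Counter(numbers)
-- ===== SOURCE B (Python) =====
-- def isint(num_str):
--     try:
--         int(num_str)
--         return True
--     except ValueError:
--         return False
--
--
-- def contains_all_numbers(expr, numbers):
--     masked = "".join(c if isint(c) else " " for c in expr)
--     expr_numbers = [int(tok) for tok in masked.split()]
--     return sorted(expr_numbers) == sorted(numbers)
-- ===== Notes on version B (the rewrite author's own statement) =====
-- stated objective: alternative
-- what changed: Instead of A's manual index while-loop that concatenates digit runs and a Counter comparison, B masks every non-isint character to a space in one join pass, tokenises with str.split(), and compares sorted(expr_numbers) == sorted(numbers).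
import Mathlib
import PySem

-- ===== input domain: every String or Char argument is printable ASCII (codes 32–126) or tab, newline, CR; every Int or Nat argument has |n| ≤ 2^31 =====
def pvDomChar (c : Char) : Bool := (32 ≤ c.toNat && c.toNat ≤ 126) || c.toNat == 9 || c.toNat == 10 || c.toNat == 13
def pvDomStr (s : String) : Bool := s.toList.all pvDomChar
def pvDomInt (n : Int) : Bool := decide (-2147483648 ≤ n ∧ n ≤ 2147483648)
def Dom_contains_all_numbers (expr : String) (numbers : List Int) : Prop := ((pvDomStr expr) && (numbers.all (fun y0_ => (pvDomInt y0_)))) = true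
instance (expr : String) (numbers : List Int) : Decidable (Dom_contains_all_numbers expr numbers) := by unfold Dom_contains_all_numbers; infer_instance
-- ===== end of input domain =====

-- B replaces A's manual index while-loop (digit-run concatenation) and Counter comparison by a
-- mask-to-spaces pass, str.split() tokenisation and a sorted-lists comparison. Objective: alternative.

-- shared helper: Python's isint (int(s) succeeds ↔ no ValueError)
def pvIsint (s : String) : Bool := (PySem.Int.ofStr? s).isSome

-- isint applied to a single character (both Pythons only ever call isint on one character)
def pvP (c : Char) : Bool := pvIsint (String.singleton c)

-- ===== PORT A =====
-- inner while loop: 'while i+1 < len(expr) and isint(expr[i+1]): num += expr[i+1]; i += 1'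
def pvInnerA (num : String) : List Char → String × List Char
  | [] => (num, [])
  | c :: rest =>
    if pvP c then pvInnerA (num.push c) rest
    else (num, c :: rest)

theorem pvInnerA_snd_length (num : String) (l : List Char) :
    (pvInnerA num l).2.length ≤ l.length := by
  induction l generalizing num with
  | nil => simp [pvInnerA]
  | cons c rest ih =>
    simp only [pvInnerA]
    split
    · exact le_trans (ih _) (Nat.le_succ _)
    · simp

-- outer while loop over the characters of expr, collecting expr_numbers
def pvScanA : List Char → List Int
  | [] => []
  | c :: rest =>
    if pvP c then
      let p := pvInnerA (String.singleton c) rest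
      ((PySem.Int.ofStr? p.1).getD 0) :: pvScanA p.2
    else pvScanA rest
termination_by l => l.length
decreasing_by
  · exact Nat.lt_succ_of_le (pvInnerA_snd_length _ _)
  · simp

-- Counter(xs) == Counter(ys) in Python is multiset equality of the two lists (both Counters
-- are built from lists, so no zero counts occur); ported as decidable List.Perm.
def contains_all_numbers (expr : String) (numbers : List Int) : Bool :=
  decide ((pvScanA expr.toList).Perm numbers)

-- ===== PORT B =====
-- masked = "".join(c if isint(c) else " " for c in expr)
def pvMask (l : List Char) : List Char :=
  l.map (fun c => if pvP c then c else ' ')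

-- expr_numbers = [int(tok) for tok in masked.split()]; return sorted(expr_numbers) == sorted(numbers)
def contains_all_numbers_alt (expr : String) (numbers : List Int) : Bool :=
  let masked := String.ofList (pvMask expr.toList)
  let exprNumbers := (PySem.Str.split₀ masked).map (fun t => (PySem.Int.ofStr? t).getD 0)
  decide (PySem.List.sorted exprNumbers (fun x => x) = PySem.List.sorted numbers (fun x => x))

-- ===== PRECONDITION & SPEC =====
def Spec_contains_all_numbers (expr : String) (numbers : List Int) (out : Bool) : Prop := out = contains_all_numbers_alt expr numbers
instance (expr : String) (numbers : List Int) (out : Bool) : Decidable (Spec_contains_all_numbers expr numbers out) := by unfold Spec_contains_all_numbers; infer_instance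

-- ===== CLAIM (what is proved, stated in full; the proofs are below) =====
def Claim_equal_contains_all_numbers : Prop := ∀ (expr : String) (numbers : List Int), Dom_contains_all_numbers expr numbers → Spec_contains_all_numbers expr numbers (contains_all_numbers expr numbers)

-- ===== LEMMAS AND PROOFS =====

-- the maximal isint-runs of a character list (proof-side characterisation shared by both ports)
def pvRuns : List Char → List (List Char)
  | [] => []
  | c :: rest =>
    if pvP c then (c :: rest.takeWhile pvP) :: pvRuns (rest.dropWhile pvP)
    else pvRuns rest
termination_by l => l.length
decreasing_by
  · exact Nat.lt_succ_of_le (List.length_dropWhile_le _ _)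
  · simp

-- within the ASCII domain, a character accepted by isint is never whitespace
theorem pvIsint_ascii_check :
    (List.range 128).all (fun n =>
      !(pvP (Char.ofNat n)) || !PySem.Chars.isspace (Char.ofNat n)) = true := by
  decide

theorem pvIsint_not_isspace (c : Char) (hdom : pvDomChar c = true)
    (h : pvP c = true) : PySem.Chars.isspace c = false := by
  have hlt : c.toNat < 128 := by
    simp only [pvDomChar, Bool.or_eq_true, Bool.and_eq_true, decide_eq_true_eq, beq_iff_eq] at hdom
    omega
  have := List.all_eq_true.mp pvIsint_ascii_check c.toNat (List.mem_range.mpr hlt)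
  rw [Char.ofNat_toNat] at this
  simp only [Bool.or_eq_true, Bool.not_eq_true'] at this
  rcases this with h' | h'
  · rw [h] at h'; cases h'
  · exact h'

theorem pvDropWhile_head_false {p : Char → Bool} (l : List Char) (d0 : Char) (d' : List Char)
    (h : l.dropWhile p = d0 :: d') : p d0 = false := by
  induction l with
  | nil => simp [List.dropWhile] at h
  | cons c rest ih =>
    rw [List.dropWhile] at h
    by_cases hc : p c
    · rw [hc] at h; exact ih h
    · simp only [Bool.not_eq_true] at hc
      rw [hc] at h
      simp only [List.cons.injEq] at h
      rw [← h.1]; exact hc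

-- the accumulator of split₀.go only prefixes the result
theorem pvGo_acc (s : List Char) : ∀ cur acc,
    PySem.Chars.split₀.go s cur acc = acc.reverse ++ PySem.Chars.split₀.go s cur [] := by
  induction s with
  | nil =>
    intro cur acc
    simp only [PySem.Chars.split₀.go]
    by_cases h : cur.isEmpty <;> simp [h]
  | cons c rest ih =>
    intro cur acc
    simp only [PySem.Chars.split₀.go]
    by_cases hs : PySem.Chars.isspace c
    · simp only [hs, if_true]
      by_cases hc : cur.isEmpty
      · simp only [hc, if_true]; exact ih [] acc
      · simp only [hc]
        rw [ih [] (cur.reverse :: acc), ih [] [cur.reverse]]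
        simp
    · simp only [hs]
      exact ih (c :: cur) acc

-- consuming a run of non-whitespace characters accumulates them into the current word
theorem pvGo_word (t : List Char) (ht : ∀ c ∈ t, PySem.Chars.isspace c = false) :
    ∀ (s : List Char) cur acc,
    PySem.Chars.split₀.go (t ++ s) cur acc = PySem.Chars.split₀.go s (t.reverse ++ cur) acc := by
  induction t with
  | nil => intro s cur acc; simp
  | cons c rest ih =>
    intro s cur acc
    have hc := ht c (by simp)
    rw [List.cons_append, PySem.Chars.split₀.go]
    simp only [hc, Bool.false_eq_true, if_false]
    rw [ih (fun d hd => ht d (by simp [hd])) s (c :: cur) acc]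
    simp

theorem pvMask_all_isint (t : List Char)
    (ht : ∀ c ∈ t, pvP c = true) : pvMask t = t := by
  unfold pvMask
  have h : ∀ c ∈ t, (if pvP c then c else ' ') = id c := fun c hc => by
    rw [ht c hc]; simp
  rw [List.map_congr_left h, List.map_id]

-- split₀ of the masked list computes exactly the maximal isint-runs
theorem pvSplit_mask (n : Nat) : ∀ l : List Char, l.length ≤ n →
    (∀ c ∈ l, pvDomChar c = true) →
    PySem.Chars.split₀ (pvMask l) = pvRuns l := by
  induction n with
  | zero =>
    intro l hl _
    have : l = [] := List.length_eq_zero_iff.mp (Nat.le_zero.mp hl)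
    simp [this, pvMask, pvRuns, PySem.Chars.split₀, PySem.Chars.split₀.go]
  | succ n ih =>
    intro l hl hdom
    match l with
    | [] => simp [pvMask, pvRuns, PySem.Chars.split₀, PySem.Chars.split₀.go]
    | c :: rest =>
      by_cases hc : pvP c
      · -- the head starts an isint run
        have hcns : PySem.Chars.isspace c = false :=
          pvIsint_not_isspace c (hdom c (by simp)) hc
        have htall : ∀ x ∈ rest.takeWhile pvP, pvP x = true := fun x hx =>
          List.mem_takeWhile_imp hx
        have htmem : ∀ x ∈ rest.takeWhile pvP, x ∈ rest := fun x hx =>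
          (List.takeWhile_sublist _).subset hx
        have hdmem : ∀ x ∈ rest.dropWhile pvP, x ∈ rest := fun x hx =>
          (List.dropWhile_sublist _).subset hx
        have htns : ∀ x ∈ rest.takeWhile pvP, PySem.Chars.isspace x = false := fun x hx =>
          pvIsint_not_isspace x (hdom x (by simp [htmem x hx])) (htall x hx)
        have hmaskcons : pvMask (c :: rest)
            = c :: (rest.takeWhile pvP ++ pvMask (rest.dropWhile pvP)) := by
          show (c :: rest).map (fun c => if pvP c then c else ' ') = _
          rw [List.map_cons, if_pos hc]
          congr 1
          conv_lhs => rw [← List.takeWhile_append_dropWhile (p := pvP) (l := rest)]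
          rw [List.map_append]
          show pvMask (rest.takeWhile pvP) ++ _ = _
          rw [pvMask_all_isint _ htall]
          rfl
        rw [hmaskcons]
        show PySem.Chars.split₀.go _ [] [] = _
        rw [PySem.Chars.split₀.go]
        simp only [hcns, Bool.false_eq_true, if_false]
        rw [pvGo_word (rest.takeWhile pvP) htns (pvMask (rest.dropWhile pvP)) [c] []]
        have hw : ((rest.takeWhile pvP).reverse ++ [c]).reverse = c :: rest.takeWhile pvP := by
          simp
        cases hdq : rest.dropWhile pvP with
        | nil =>
          show PySem.Chars.split₀.go [] _ [] = _
          rw [PySem.Chars.split₀.go]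
          have hne : ((rest.takeWhile pvP).reverse ++ [c]).isEmpty = false := by simp
          rw [hne]
          simp only [Bool.false_eq_true, if_false, List.reverse_cons, List.reverse_nil,
            List.nil_append, hw]
          rw [pvRuns, if_pos hc, hdq, pvRuns]
        | cons d0 d' =>
          have hd0 : pvP d0 = false := pvDropWhile_head_false rest d0 d' hdq
          have hmaskd : pvMask (d0 :: d') = ' ' :: pvMask d' := by
            show (d0 :: d').map _ = _
            rw [List.map_cons, if_neg (by rw [hd0]; exact Bool.false_ne_true)]
            rfl
          rw [hmaskd]
          show PySem.Chars.split₀.go (' ' :: pvMask d') _ [] = _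
          rw [PySem.Chars.split₀.go]
          have hsp : PySem.Chars.isspace ' ' = true := by decide
          have hne : ((rest.takeWhile pvP).reverse ++ [c]).isEmpty = false := by simp
          rw [hsp, if_pos rfl, hne]
          simp only [Bool.false_eq_true, if_false, hw]
          rw [pvGo_acc (pvMask d') [] [c :: rest.takeWhile pvP]]
          have hd'len : d'.length ≤ n := by
            have h1 : (rest.dropWhile pvP).length ≤ rest.length := List.length_dropWhile_le _ _
            rw [hdq] at h1
            simp only [List.length_cons] at h1 hl
            omega
          have hd'dom : ∀ x ∈ d', pvDomChar x = true := fun x hx =>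
            hdom x (List.mem_cons_of_mem _ (hdmem x (by rw [hdq]; exact List.mem_cons_of_mem _ hx)))
          have hrec := ih d' hd'len hd'dom
          rw [show PySem.Chars.split₀ (pvMask d')
              = PySem.Chars.split₀.go (pvMask d') [] [] from rfl] at hrec
          rw [hrec]
          rw [pvRuns, if_pos hc, hdq, pvRuns]
          simp only [hd0, Bool.false_eq_true, if_false]
          simp
      · -- the head is masked to a space and skipped
        have hmask : pvMask (c :: rest) = ' ' :: pvMask rest := by
          show (c :: rest).map _ = _
          rw [List.map_cons, if_neg hc]
          rfl
        rw [hmask]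
        show PySem.Chars.split₀.go (' ' :: pvMask rest) [] [] = _
        rw [PySem.Chars.split₀.go]
        have hsp : PySem.Chars.isspace ' ' = true := by decide
        rw [hsp, if_pos rfl]
        simp only [List.isEmpty_nil, if_true]
        have hlen : rest.length ≤ n := by
          simp only [List.length_cons] at hl; omega
        have hrec := ih rest hlen (fun x hx => hdom x (by simp [hx]))
        rw [show PySem.Chars.split₀ (pvMask rest)
            = PySem.Chars.split₀.go (pvMask rest) [] [] from rfl] at hrec
        rw [hrec, pvRuns, if_neg hc]

-- A's inner loop consumes exactly the maximal isint-run after its start character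
theorem pvInnerA_eq (l : List Char) : ∀ cs : List Char,
    pvInnerA (String.ofList cs) l =
      (String.ofList (cs ++ l.takeWhile pvP), l.dropWhile pvP) := by
  induction l with
  | nil => intro cs; simp [pvInnerA]
  | cons c rest ih =>
    intro cs
    simp only [pvInnerA, List.takeWhile, List.dropWhile]
    by_cases h : pvP c
    · have hpush : (String.ofList cs).push c = String.ofList (cs ++ [c]) := by
        apply String.toList_injective; simp
      simp only [h, if_true]
      rw [hpush, ih (cs ++ [c]), List.append_assoc]
      rfl
    · simp [h]

-- A's scan computes the int of each maximal isint-run, in order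
theorem pvScanA_eq_runs (n : Nat) : ∀ l : List Char, l.length ≤ n →
    pvScanA l = (pvRuns l).map (fun t => (PySem.Int.ofStr? (String.ofList t)).getD 0) := by
  induction n with
  | zero =>
    intro l hl
    have : l = [] := List.length_eq_zero_iff.mp (Nat.le_zero.mp hl)
    simp [this, pvScanA, pvRuns]
  | succ n ih =>
    intro l hl
    match l with
    | [] => simp [pvScanA, pvRuns]
    | c :: rest =>
      rw [pvScanA, pvRuns]
      by_cases h : pvP c
      · have hsing : String.singleton c = String.ofList [c] := by
          apply String.toList_injective; simp
        rw [if_pos h, if_pos h, hsing, pvInnerA_eq]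
        simp only [List.map_cons, List.singleton_append]
        rw [ih _ (le_trans (List.length_dropWhile_le _ _) (Nat.le_of_succ_le_succ hl))]
      · rw [if_neg h, if_neg h]
        exact ih rest (Nat.le_of_succ_le_succ hl)

-- ===== VERDICT (by name: the statement is the Claim_ definition above) =====
theorem contains_all_numbers_spec : Claim_equal_contains_all_numbers := by
  intro expr numbers hdom
  unfold Spec_contains_all_numbers contains_all_numbers contains_all_numbers_alt
  have hdom' : ∀ c ∈ expr.toList, pvDomChar c = true := by
    unfold Dom_contains_all_numbers pvDomStr at hdom
    simp only [Bool.and_eq_true, List.all_eq_true] at hdom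
    exact hdom.1
  have hsplit : PySem.Str.split₀ (String.ofList (pvMask expr.toList))
      = (pvRuns expr.toList).map String.ofList := by
    rw [PySem.Str.split₀, String.toList_ofList,
      pvSplit_mask expr.toList.length expr.toList (le_refl _) hdom']
  have hnums : (PySem.Str.split₀ (String.ofList (pvMask expr.toList))).map
      (fun t => (PySem.Int.ofStr? t).getD 0) = pvScanA expr.toList := by
    rw [hsplit, List.map_map,
      pvScanA_eq_runs expr.toList.length expr.toList (le_refl _)]
    rfl
  simp only [hnums]
  rw [eq_comm]
  exact decide_eq_decide.mpr (PySem.List.sorted_id_eq_sorted_id_iff_perm _ _)
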